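-- pv_equiv track=rewrite | github.com/fescofesco/CCC | CCC/Challenge 2024/level5/input_parse.py | simulate_vertical_placement
-- ===== SOURCE A (Python) =====
-- from typing import List, Tuple
--
-- def simulate_vertical_placement(x: int, y: int) -> Tuple[int, List[List[str]]]:
--     matrix = [['.'] * x for _ in range(y)]
--     desks_placed = 0
--     block_w, block_h = 2, 3
--     desk_pos = [(0, 0), (1, 0)]  # Desk occupies (i, j) and (i+1, j)
--
--     for j in range(0, x):
--         for i in range(0, y):
--             if matrix[i][j] != '.':
--                 continue
--
--             # Try to place vertically
--             if i + 1 < y and matrix[i + 1][j] == '.':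
--                 # Check adjacency
--                 if not has_adjacent_desk(matrix, x, y, [(i, j), (i + 1, j)]):
--                     matrix[i][j] = 'X'
--                     matrix[i + 1][j] = 'X'
--                     desks_placed += 1
--                     # Skip the next two rows to maintain the 3x2 block pattern
--                     i += 2
--             # Move to next possible position
--
--     return desks_placed, matrix
--
-- def has_adjacent_desk(matrix, x, y, desk_cells):
--     """Check if any adjacent cells (including diagonals) have a desk."""
--     for ci, cj in desk_cells:
--         for ni in range(ci - 1, ci + 2):
--             for nj in range(cj - 1, cj + 2):
--                 if (ni, nj) in desk_cells:
--                     continue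
--                 if 0 <= ni < y and 0 <= nj < x:
--                     if matrix[ni][nj] == 'X':
--                         return True
--     return False
-- ===== SOURCE B (Python) =====
-- def simulate_vertical_placement(x, y):
--     cols = max(x, 0)
--     rows = max(y, 0)
--     pairs = (y - 2) // 3 + 1 if y >= 2 else 0
--     desks_placed = ((cols + 1) // 2) * pairs
--     matrix = [['X' if j % 2 == 0 and (i % 3 == 1 or (i % 3 == 0 and i + 1 < y)) else '.'
--                for j in range(cols)]
--               for i in range(rows)]
--     return desks_placed, matrix
-- ===== Notes on version B (the rewrite author's own statement) =====
-- stated objective: faster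
-- what changed: Replaces the greedy column-by-column simulation with adjacency scans by a direct closed-form construction: each cell is computed from i,j parities (j even and i%3 in {0,1} with the pair fitting) and the desk count is (ceil(x/2))*((y-2)//3+1).
import Mathlib
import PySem

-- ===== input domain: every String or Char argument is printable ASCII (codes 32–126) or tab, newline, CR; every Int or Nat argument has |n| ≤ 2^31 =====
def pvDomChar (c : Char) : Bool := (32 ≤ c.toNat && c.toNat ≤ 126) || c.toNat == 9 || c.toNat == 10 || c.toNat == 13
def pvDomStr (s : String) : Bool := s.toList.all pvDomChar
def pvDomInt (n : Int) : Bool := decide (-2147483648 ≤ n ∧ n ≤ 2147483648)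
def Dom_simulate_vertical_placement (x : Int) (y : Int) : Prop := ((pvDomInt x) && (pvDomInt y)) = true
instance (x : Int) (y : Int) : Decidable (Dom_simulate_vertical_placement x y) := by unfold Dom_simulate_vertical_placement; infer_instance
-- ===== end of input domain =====

-- B replaces A's greedy simulation with a direct closed-form construction of the same grid and count.

-- ===== PORT A =====
-- matrix[i][j] read/write; indices are always in range where A uses them (loop variables
-- of range(y)/range(x), or guarded by 0<=ni<y and 0<=nj<x), so getD/set are exact here.
def pvGet (m : List (List String)) (i j : Int) : String :=
  (m.getD i.toNat []).getD j.toNat ""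

def pvSet (m : List (List String)) (i j : Int) (v : String) : List (List String) :=
  m.set i.toNat ((m.getD i.toNat []).set j.toNat v)

def has_adjacent_desk (m : List (List String)) (x y : Int) (cells : List (Int × Int)) : Bool :=
  cells.any (fun c =>
    (PySem.List.pyRange (c.1 - 1) (c.1 + 2) 1).any (fun ni =>
      (PySem.List.pyRange (c.2 - 1) (c.2 + 2) 1).any (fun nj =>
        if cells.contains (ni, nj) then false
        else if 0 ≤ ni ∧ ni < y ∧ 0 ≤ nj ∧ nj < x then pvGet m ni nj == "X"
        else false)))

-- the body of A's inner loop (state = (matrix, desks_placed)); Python's 'i += 2' has no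
-- effect on a for-loop variable, so it does not appear.
def svpStep (x y j : Int) (st : List (List String) × Int) (i : Int) : List (List String) × Int :=
  if pvGet st.1 i j ≠ "." then st
  else if i + 1 < y ∧ pvGet st.1 (i + 1) j = "." then
    if ¬ (has_adjacent_desk st.1 x y [(i, j), (i + 1, j)] = true) then
      (pvSet (pvSet st.1 i j "X") (i + 1) j "X", st.2 + 1)
    else st
  else st

def simulate_vertical_placement (x : Int) (y : Int) : Int × List (List String) :=
  let matrix0 := List.replicate y.toNat (List.replicate x.toNat ".")
  let st := (PySem.List.pyRange 0 x 1).foldl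
    (fun st j => (PySem.List.pyRange 0 y 1).foldl (svpStep x y j) st) (matrix0, 0)
  (st.2, st.1)

-- ===== PORT B =====
def altCell (y i j : Int) : String :=
  if j % 2 = 0 ∧ (i % 3 = 1 ∨ (i % 3 = 0 ∧ i + 1 < y)) then "X" else "."

def altPairs (y : Int) : Int :=
  if 2 ≤ y then PySem.Int.floordiv (y - 2) 3 + 1 else 0

def simulate_vertical_placement_alt (x : Int) (y : Int) : Int × List (List String) :=
  let cols := max x 0
  let rows := max y 0
  let desks := PySem.Int.floordiv (cols + 1) 2 * altPairs y
  let matrix := (PySem.List.pyRange 0 rows 1).map (fun i =>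
    (PySem.List.pyRange 0 cols 1).map (fun j => altCell y i j))
  (desks, matrix)

-- ===== PRECONDITION & SPEC =====
def Spec_simulate_vertical_placement (x : Int) (y : Int) (out : Int × List (List String)) : Prop := out = simulate_vertical_placement_alt x y
instance (x : Int) (y : Int) (out : Int × List (List String)) : Decidable (Spec_simulate_vertical_placement x y out) := by unfold Spec_simulate_vertical_placement; infer_instance

-- ===== CLAIM (what is proved, stated in full; the proofs are below) =====
def Claim_equal_simulate_vertical_placement : Prop := ∀ (x : Int) (y : Int), Dom_simulate_vertical_placement x y → Spec_simulate_vertical_placement x y (simulate_vertical_placement x y)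

-- ===== LEMMAS AND PROOFS =====

-- abstraction: a y×x matrix given by a cell function
def mkMat (x y : Int) (f : Int → Int → String) : List (List String) :=
  (List.range y.toNat).map (fun (i : Nat) => (List.range x.toNat).map (fun (j : Nat) => f (↑i) (↑j)))

-- state of the matrix while A is processing column j, after the first k inner iterations:
-- columns < j carry the final pattern, column j carries the pairs started at rows < k, the rest is '.'
def colF (y j k : Int) (i j' : Int) : String :=
  if j' < j then altCell y i j'
  else if j' = j ∧ j % 2 = 0 ∧ 0 ≤ i ∧ i % 3 ≤ 1 ∧ i - i % 3 < k ∧ i - i % 3 + 1 < y then "X"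
  else "."

-- desks placed in one even column after its first k inner iterations
def pcount (y k : Int) : Int := (min k (max (y - 1) 0) + 2) / 3

lemma mkMat_congr {x y : Int} {f g : Int → Int → String}
    (h : ∀ i j, 0 ≤ i → i < y → 0 ≤ j → j < x → f i j = g i j) :
    mkMat x y f = mkMat x y g := by
  unfold mkMat
  refine List.map_congr_left (fun i hi => ?_)
  simp only [List.mem_range] at hi
  refine List.map_congr_left (fun j hj => ?_)
  simp only [List.mem_range] at hj
  exact h (↑i) (↑j) (by omega) (by omega) (by omega) (by omega)

lemma mkMat_get {x y : Int} {f : Int → Int → String} {i j : Int}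
    (hi0 : 0 ≤ i) (hiy : i < y) (hj0 : 0 ≤ j) (hjx : j < x) :
    pvGet (mkMat x y f) i j = f i j := by
  unfold pvGet mkMat
  have hi : i.toNat < y.toNat := by omega
  have hj : j.toNat < x.toNat := by omega
  have houter : (List.map (fun (a : Nat) => List.map (fun (b : Nat) => f (↑a) (↑b))
        (List.range x.toNat)) (List.range y.toNat)).getD i.toNat []
      = List.map (fun (b : Nat) => f (↑i.toNat) (↑b)) (List.range x.toNat) := by
    rw [List.getD_eq_getElem?_getD, List.getElem?_map, List.getElem?_range hi]
    rfl
  rw [houter, List.getD_eq_getElem?_getD, List.getElem?_map, List.getElem?_range hj]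
  simp only [Option.map_some, Option.getD_some]
  congr 1 <;> omega

lemma mkMat_set {x y : Int} {f : Int → Int → String} {i j : Int} {v : String}
    (hi0 : 0 ≤ i) (hiy : i < y) (hj0 : 0 ≤ j) (hjx : j < x) :
    pvSet (mkMat x y f) i j v
      = mkMat x y (fun a b => if a = i ∧ b = j then v else f a b) := by
  unfold pvSet mkMat
  have hi : i.toNat < y.toNat := by omega
  have hj : j.toNat < x.toNat := by omega
  have houter : (List.map (fun (a : Nat) => List.map (fun (b : Nat) => f (↑a) (↑b))
        (List.range x.toNat)) (List.range y.toNat)).getD i.toNat []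
      = List.map (fun (b : Nat) => f (↑i.toNat) (↑b)) (List.range x.toNat) := by
    rw [List.getD_eq_getElem?_getD, List.getElem?_map, List.getElem?_range hi]
    rfl
  rw [houter]
  apply List.ext_getElem
  · simp
  intro a ha1 ha2
  rw [List.getElem_set]
  conv_rhs => rw [List.getElem_map, List.getElem_range]
  by_cases hai : i.toNat = a
  · rw [if_pos hai]
    apply List.ext_getElem
    · simp
    intro b hb1 hb2
    rw [List.getElem_set]
    conv_rhs => rw [List.getElem_map, List.getElem_range]
    beta_reduce
    by_cases hbj : j.toNat = b
    · rw [if_pos hbj, if_pos ⟨by omega, by omega⟩]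
    · rw [if_neg hbj, List.getElem_map, List.getElem_range,
        if_neg (by rintro ⟨h1, h2⟩; omega)]
      congr 1
      omega
  · rw [if_neg hai, List.getElem_map, List.getElem_range]
    refine List.map_congr_left (fun b hbm => ?_)
    beta_reduce
    rw [if_neg (by rintro ⟨h1, h2⟩; omega)]

-- a single found 'X' neighbour makes has_adjacent_desk true
lemma adj_true {m : List (List String)} {x y : Int} {cells : List (Int × Int)}
    {c : Int × Int} (hc : c ∈ cells) {ni nj : Int}
    (h1 : c.1 - 1 ≤ ni ∧ ni < c.1 + 2) (h2 : c.2 - 1 ≤ nj ∧ nj < c.2 + 2)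
    (hnot : cells.contains (ni, nj) = false)
    (hb : 0 ≤ ni ∧ ni < y ∧ 0 ≤ nj ∧ nj < x)
    (hX : pvGet m ni nj = "X") :
    has_adjacent_desk m x y cells = true := by
  unfold has_adjacent_desk
  rw [List.any_eq_true]
  refine ⟨c, hc, ?_⟩
  rw [List.any_eq_true]
  refine ⟨ni, PySem.List.mem_pyRange_one.mpr ⟨by omega, h1.2⟩, ?_⟩
  rw [List.any_eq_true]
  refine ⟨nj, PySem.List.mem_pyRange_one.mpr ⟨by omega, h2.2⟩, ?_⟩
  rw [hnot]
  simp only [Bool.false_eq_true, if_false, if_pos hb, hX]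
  rfl

-- during a placement attempt at rows k,k+1 of an even column j, no neighbour is 'X'
lemma adj_even_false {x y j k : Int} (hj2 : j % 2 = 0) (hk3 : k % 3 = 0) :
    has_adjacent_desk (mkMat x y (colF y j k)) x y [(k, j), (k + 1, j)] = false := by
  have leaf : ∀ ni nj : Int, k - 1 ≤ ni → ni ≤ k + 2 → j - 1 ≤ nj → nj ≤ j + 1 →
      (if [((k : Int), j), (k + 1, j)].contains (ni, nj) then false
       else if 0 ≤ ni ∧ ni < y ∧ 0 ≤ nj ∧ nj < x then
         pvGet (mkMat x y (colF y j k)) ni nj == "X"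
       else false) = false := by
    intro ni nj hni1 hni2 hnj1 hnj2
    by_cases hmem : [((k : Int), j), (k + 1, j)].contains (ni, nj)
    · rw [if_pos hmem]
    · rw [if_neg hmem]
      simp only [List.contains_cons, List.contains_nil, Bool.or_false, Bool.or_eq_true,
        beq_iff_eq, Prod.mk.injEq, not_or, not_and_or] at hmem
      by_cases hb : 0 ≤ ni ∧ ni < y ∧ 0 ≤ nj ∧ nj < x
      · rw [if_pos hb, mkMat_get hb.1 hb.2.1 hb.2.2.1 hb.2.2.2]
        unfold colF altCell
        split_ifs with h1 h2 h3 <;> first | rfl | (exfalso; omega)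
      · rw [if_neg hb]
  have hr : ∀ a : Int, PySem.List.pyRange (a - 1) (a + 2) 1 = [a - 1, a, a + 1] := by
    intro a
    rw [PySem.List.pyRange_one_cons (by omega), PySem.List.pyRange_one_cons (by omega),
      PySem.List.pyRange_one_cons (by omega), PySem.List.pyRange_one_eq_nil (by omega)]
    norm_num
  unfold has_adjacent_desk
  simp only [List.any_cons, List.any_nil, Bool.or_false]
  rw [hr k, hr (k + 1), hr j]
  simp only [List.any_cons, List.any_nil, Bool.or_false, Bool.or_eq_false_iff]
  and_intros <;> (apply leaf <;> omega)

-- a full column's neighbour to the left (an even, finished column) blocks any attempt in an odd column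
lemma adj_odd_true {x y j k : Int} (hj0 : 0 ≤ j) (hjx : j < x) (hj2 : j % 2 ≠ 0)
    (hk0 : 0 ≤ k) (hky : k + 1 < y) :
    has_adjacent_desk (mkMat x y (colF y j k)) x y [(k, j), (k + 1, j)] = true := by
  have hj1 : 1 ≤ j := by omega
  have hcontains : ∀ ni : Int, ([((k : Int), j), (k + 1, j)].contains (ni, j - 1)) = false := by
    intro ni
    simp only [List.contains_cons, List.contains_nil, Bool.or_false, Bool.or_eq_false_iff,
      beq_eq_false_iff_ne, ne_eq, Prod.mk.injEq, not_and]
    exact ⟨fun _ => by omega, fun _ => by omega⟩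
  rcases (by omega : k % 3 ≤ 1 ∨ k % 3 = 2) with h3 | h3
  · refine adj_true (c := ((k : Int), j)) (List.mem_cons_self) (ni := k) (nj := j - 1)
      ⟨by omega, by omega⟩ ⟨by omega, by omega⟩ (hcontains k)
      ⟨by omega, by omega, by omega, by omega⟩ ?_
    rw [mkMat_get hk0 (by omega) (by omega) (by omega)]
    unfold colF
    rw [if_pos (by omega)]
    unfold altCell
    refine if_pos ⟨by omega, ?_⟩
    rcases (by omega : k % 3 = 0 ∨ k % 3 = 1) with h | h
    · exact Or.inr ⟨h, hky⟩
    · exact Or.inl h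
  · refine adj_true (c := ((k : Int), j)) (List.mem_cons_self) (ni := k - 1) (nj := j - 1)
      ⟨by omega, by omega⟩ ⟨by omega, by omega⟩ (hcontains (k - 1))
      ⟨by omega, by omega, by omega, by omega⟩ ?_
    rw [mkMat_get (by omega) (by omega) (by omega) (by omega)]
    unfold colF
    rw [if_pos (by omega)]
    unfold altCell
    exact if_pos ⟨by omega, Or.inl (by omega)⟩

-- inside an even column, the pair just below (rows k-2,k-1) blocks an attempt at rows k,k+1 when k % 3 = 2
lemma adj_even2_true {x y j k : Int} (hj0 : 0 ≤ j) (hjx : j < x) (hj2 : j % 2 = 0)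
    (hk0 : 0 ≤ k) (h3 : k % 3 = 2) (hky : k + 1 < y) :
    has_adjacent_desk (mkMat x y (colF y j k)) x y [(k, j), (k + 1, j)] = true := by
  refine adj_true (c := ((k : Int), j)) (List.mem_cons_self) (ni := k - 1) (nj := j)
    ⟨by omega, by omega⟩ ⟨by omega, by omega⟩ ?_ ⟨by omega, by omega, by omega, by omega⟩ ?_
  · simp only [List.contains_cons, List.contains_nil, Bool.or_false, Bool.or_eq_false_iff,
      beq_eq_false_iff_ne, ne_eq, Prod.mk.injEq, not_and]
    exact ⟨fun h => by omega, fun h => by omega⟩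
  · rw [mkMat_get (by omega) (by omega) (by omega) (by omega)]
    unfold colF
    rw [if_neg (by omega), if_pos (by omega)]

-- the matrix does not change in an iteration that places nothing
lemma colF_frozen {x y j k : Int}
    (h : j % 2 ≠ 0 ∨ k % 3 ≠ 0 ∨ y ≤ k + 1) :
    mkMat x y (colF y j (k + 1)) = mkMat x y (colF y j k) := by
  apply mkMat_congr
  intro i j' hi0 hiy hj0' hjx'
  rcases h with h | h | h <;>
    · unfold colF
      split_ifs <;> first | rfl | omega

-- the result of one inner-loop iteration at row k
lemma svpStep_spec {x y j k : Int} (hj0 : 0 ≤ j) (hjx : j < x)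
    (hk0 : 0 ≤ k) (hky : k < y) (d : Int) :
    svpStep x y j (mkMat x y (colF y j k), d) k
      = (mkMat x y (colF y j (k + 1)),
         d + if j % 2 = 0 ∧ k % 3 = 0 ∧ k + 1 < y then 1 else 0) := by
  have hcell : pvGet (mkMat x y (colF y j k)) k j = colF y j k k j :=
    mkMat_get hk0 hky hj0 hjx
  simp only [svpStep]
  rw [hcell]
  by_cases hj2 : j % 2 = 0
  · rcases (by omega : k % 3 = 0 ∨ k % 3 = 1 ∨ k % 3 = 2) with h3 | h3 | h3
    · have hc : colF y j k k j = "." := by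
        unfold colF; split_ifs <;> first | rfl | omega
      rw [hc, if_neg (fun h => h rfl)]
      by_cases hky1 : k + 1 < y
      · have hcell2 : pvGet (mkMat x y (colF y j k)) (k + 1) j = colF y j k (k + 1) j :=
          mkMat_get (by omega) (by omega) hj0 hjx
        have hc2 : colF y j k (k + 1) j = "." := by
          unfold colF; split_ifs <;> first | rfl | omega
        rw [hcell2, hc2, if_pos ⟨hky1, rfl⟩,
          adj_even_false hj2 h3, if_pos (by simp)]
        rw [mkMat_set hk0 (by omega) hj0 hjx, mkMat_set (by omega) (by omega) hj0 hjx]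
        simp only [Prod.mk.injEq]
        refine ⟨?_, by rw [if_pos ⟨hj2, h3, hky1⟩]⟩
        apply mkMat_congr
        intro i j' hi0 hiy hj0' hjx'
        simp only [colF]
        split_ifs <;> first | rfl | omega
      · rw [if_neg (fun h => hky1 h.1), colF_frozen (Or.inr (Or.inr (by omega))),
          if_neg (by rintro ⟨-, -, h⟩; omega)]
        simp
    · have hc : colF y j k k j = "X" := by
        unfold colF; split_ifs <;> first | rfl | omega
      rw [hc, if_pos (by decide), colF_frozen (Or.inr (Or.inl (by omega))),
        if_neg (by rintro ⟨-, h, -⟩; omega)]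
      simp
    · have hc : colF y j k k j = "." := by
        unfold colF; split_ifs <;> first | rfl | omega
      rw [hc, if_neg (fun h => h rfl)]
      by_cases hky1 : k + 1 < y
      · have hcell2 : pvGet (mkMat x y (colF y j k)) (k + 1) j = colF y j k (k + 1) j :=
          mkMat_get (by omega) (by omega) hj0 hjx
        have hc2 : colF y j k (k + 1) j = "." := by
          unfold colF; split_ifs <;> first | rfl | omega
        rw [hcell2, hc2, if_pos ⟨hky1, rfl⟩,
          adj_even2_true hj0 hjx hj2 hk0 h3 hky1, if_neg (by simp),
          colF_frozen (Or.inr (Or.inl (by omega))), if_neg (by rintro ⟨-, h, -⟩; omega)]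
        simp
      · rw [if_neg (fun h => hky1 h.1), colF_frozen (Or.inr (Or.inr (by omega))),
          if_neg (by rintro ⟨-, -, h⟩; omega)]
        simp
  · have hc : colF y j k k j = "." := by
      unfold colF; split_ifs <;> first | rfl | omega
    rw [hc, if_neg (fun h => h rfl)]
    by_cases hky1 : k + 1 < y
    · have hcell2 : pvGet (mkMat x y (colF y j k)) (k + 1) j = colF y j k (k + 1) j :=
        mkMat_get (by omega) (by omega) hj0 hjx
      have hc2 : colF y j k (k + 1) j = "." := by
        unfold colF; split_ifs <;> first | rfl | omega
      rw [hcell2, hc2, if_pos ⟨hky1, rfl⟩, adj_odd_true hj0 hjx hj2 hk0 hky1,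
        if_neg (by simp), colF_frozen (Or.inl hj2), if_neg (by rintro ⟨h, -⟩; exact hj2 h)]
      simp
    · rw [if_neg (fun h => hky1 h.1), colF_frozen (Or.inl hj2),
        if_neg (by rintro ⟨h, -⟩; exact hj2 h)]
      simp

lemma pcount_zero (y : Int) : pcount y 0 = 0 := by
  unfold pcount; omega

lemma pcount_succ {y k : Int} (hk0 : 0 ≤ k) :
    pcount y (k + 1) = pcount y k + (if k % 3 = 0 ∧ k + 1 < y then 1 else 0) := by
  unfold pcount; split_ifs <;> omega

lemma pcount_done {y : Int} (hy : 0 ≤ y) : pcount y y = altPairs y := by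
  unfold pcount altPairs
  split_ifs with h
  · rw [PySem.Int.floordiv_eq_ediv_of_pos (by omega : (0 : Int) < 3)]
    omega
  · omega

-- the whole inner loop over rows 0..n-1 of column j
lemma inner_loop {x y j : Int} (hj0 : 0 ≤ j) (hjx : j < x) (d : Int) :
    ∀ n : Nat, (n : Int) ≤ y →
      (PySem.List.pyRange 0 (n : Int) 1).foldl (svpStep x y j) (mkMat x y (colF y j 0), d)
        = (mkMat x y (colF y j (n : Int)),
           d + if j % 2 = 0 then pcount y (n : Int) else 0) := by
  intro n
  induction n with
  | zero =>
      intro _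
      rw [Nat.cast_zero, PySem.List.pyRange_one_eq_nil le_rfl, List.foldl_nil]
      simp [pcount_zero]
  | succ n ih =>
      intro hn
      have hc : ((n + 1 : Nat) : Int) = (n : Int) + 1 := by push_cast; ring
      rw [hc] at hn ⊢
      rw [PySem.List.pyRange_one_succ_right (by omega), List.foldl_append,
        List.foldl_cons, List.foldl_nil, ih (by omega),
        svpStep_spec hj0 hjx (by omega) (by omega)]
      simp only [Prod.mk.injEq]
      refine ⟨trivial, ?_⟩
      rw [pcount_succ (by omega)]
      split_ifs <;> omega

-- after processing the whole column j the pattern of columns < j+1 is final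
lemma colF_done {x y j : Int} :
    mkMat x y (colF y j y) = mkMat x y (colF y (j + 1) 0) := by
  apply mkMat_congr
  intro i j' hi0 hiy hj0' hjx'
  unfold colF altCell
  split_ifs <;> first | rfl | omega

lemma inner_full {x y j : Int} (hj0 : 0 ≤ j) (hjx : j < x) (d : Int) :
    (PySem.List.pyRange 0 y 1).foldl (svpStep x y j) (mkMat x y (colF y j 0), d)
      = (mkMat x y (colF y (j + 1) 0), d + if j % 2 = 0 then altPairs y else 0) := by
  by_cases hy : 0 ≤ y
  · have h := inner_loop (y := y) hj0 hjx d y.toNat (by omega)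
    rw [show ((y.toNat : Nat) : Int) = y by omega] at h
    rw [h, colF_done, pcount_done hy]
  · rw [PySem.List.pyRange_one_eq_nil (by omega), List.foldl_nil]
    have hm : mkMat x y (colF y j 0) = mkMat x y (colF y (j + 1) 0) :=
      mkMat_congr (by intro i j' hi0 hiy _ _; exact absurd hiy (by omega))
    have hp : altPairs y = 0 := by unfold altPairs; rw [if_neg (by omega)]
    rw [hm, hp]
    simp

-- the outer loop over columns 0..n-1
lemma outer_loop (x y : Int) :
    ∀ n : Nat, (n : Int) ≤ x →
      (PySem.List.pyRange 0 (n : Int) 1).foldl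
          (fun st j => (PySem.List.pyRange 0 y 1).foldl (svpStep x y j) st)
          (mkMat x y (colF y 0 0), 0)
        = (mkMat x y (colF y (n : Int) 0), ((n : Int) + 1) / 2 * altPairs y) := by
  intro n
  induction n with
  | zero =>
      intro _
      rw [Nat.cast_zero, PySem.List.pyRange_one_eq_nil le_rfl, List.foldl_nil]
      norm_num
  | succ n ih =>
      intro hn
      have hc : ((n + 1 : Nat) : Int) = (n : Int) + 1 := by push_cast; ring
      rw [hc] at hn ⊢
      rw [PySem.List.pyRange_one_succ_right (by omega), List.foldl_append,
        List.foldl_cons, List.foldl_nil, ih (by omega),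
        inner_full (by omega) (by omega)]
      simp only [Prod.mk.injEq]
      refine ⟨trivial, ?_⟩
      by_cases h2 : (n : Int) % 2 = 0
      · rw [if_pos h2, show ((n : Int) + 1 + 1) / 2 = ((n : Int) + 1) / 2 + 1 by omega]
        ring
      · rw [if_neg h2, show ((n : Int) + 1 + 1) / 2 = ((n : Int) + 1) / 2 by omega]
        ring

-- ===== VERDICT (by name: the statement is the Claim_ definition above) =====
theorem simulate_vertical_placement_spec : Claim_equal_simulate_vertical_placement := by
  intro x y _
  unfold Spec_simulate_vertical_placement simulate_vertical_placement simulate_vertical_placement_alt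
  show (((PySem.List.pyRange 0 x 1).foldl
      (fun st j => (PySem.List.pyRange 0 y 1).foldl (svpStep x y j) st)
      (List.replicate y.toNat (List.replicate x.toNat "."), 0)).2,
    ((PySem.List.pyRange 0 x 1).foldl
      (fun st j => (PySem.List.pyRange 0 y 1).foldl (svpStep x y j) st)
      (List.replicate y.toNat (List.replicate x.toNat "."), 0)).1)
    = (PySem.Int.floordiv (max x 0 + 1) 2 * altPairs y,
       (PySem.List.pyRange 0 (max y 0) 1).map (fun i =>
         (PySem.List.pyRange 0 (max x 0) 1).map (fun j => altCell y i j)))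
  have hinit : mkMat x y (colF y 0 0) = List.replicate y.toNat (List.replicate x.toNat ".") := by
    unfold mkMat
    calc (List.range y.toNat).map (fun (i : Nat) => (List.range x.toNat).map
            (fun (j : Nat) => colF y 0 0 (↑i) (↑j)))
        = (List.range y.toNat).map (fun _ => List.replicate x.toNat ".") := by
          refine List.map_congr_left (fun i _ => ?_)
          rw [List.map_congr_left (fun (j : Nat) _ =>
              (by unfold colF; split_ifs <;> first | rfl | omega :
                colF y 0 0 (↑i) (↑j) = (fun (_ : Nat) => ".") j)),
            List.map_const', List.length_range]
      _ = List.replicate y.toNat (List.replicate x.toNat ".") := by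
          rw [List.map_const', List.length_range]
  by_cases hx : 0 ≤ x
  · have h := outer_loop x y x.toNat (by omega)
    rw [show ((x.toNat : Nat) : Int) = x by omega, hinit] at h
    rw [h]
    clear h
    have hcount : ((x : Int) + 1) / 2 * altPairs y
        = PySem.Int.floordiv (max x 0 + 1) 2 * altPairs y := by
      rw [PySem.Int.floordiv_eq_ediv_of_pos (by omega : (0 : Int) < 2),
        show max x 0 = x by omega]
    have hmat : mkMat x y (colF y x 0)
        = (PySem.List.pyRange 0 (max y 0) 1).map (fun i =>
            (PySem.List.pyRange 0 (max x 0) 1).map (fun j => altCell y i j)) := by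
      rw [show max y 0 = ((y.toNat : Nat) : Int) by omega,
        show max x 0 = ((x.toNat : Nat) : Int) by omega,
        PySem.List.pyRange_zero_nat, PySem.List.pyRange_zero_nat, List.map_map]
      unfold mkMat
      refine List.map_congr_left (fun i hi => ?_)
      simp only [Function.comp_apply, List.map_map]
      refine List.map_congr_left (fun j hj => ?_)
      simp only [List.mem_range] at hj
      simp only [Function.comp_apply]
      unfold colF
      rw [if_pos (by omega)]
    rw [← hcount, ← hmat]
  · have hx0 : x.toNat = 0 := by omega
    rw [show PySem.List.pyRange 0 x 1 = [] from PySem.List.pyRange_one_eq_nil (by omega),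
      List.foldl_nil]
    have hcount : (0 : Int) = PySem.Int.floordiv (max x 0 + 1) 2 * altPairs y := by
      rw [show max x 0 = (0 : Int) by omega]
      rw [show PySem.Int.floordiv ((0 : Int) + 1) 2 = 0 by decide]
      ring
    have hmat : List.replicate y.toNat (List.replicate x.toNat ".")
        = (PySem.List.pyRange 0 (max y 0) 1).map (fun i =>
            (PySem.List.pyRange 0 (max x 0) 1).map (fun j => altCell y i j)) := by
      rw [show max y 0 = ((y.toNat : Nat) : Int) by omega,
        show max x 0 = (0 : Int) by omega, PySem.List.pyRange_zero_nat, List.map_map]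
      rw [show PySem.List.pyRange 0 (0 : Int) 1 = [] from PySem.List.pyRange_one_eq_nil le_rfl]
      simp only [List.map_nil, hx0, List.replicate_zero]
      simp [Function.comp_def, List.map_const']
    rw [← hcount, ← hmat]
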